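-- pv_equiv track=rewrite | github.com/grahambarrgraham/projecteuler | problems/problem_19_counting_sundays.py | fill_months_to
-- ===== SOURCE A (Python) =====
-- month_days = [('Jan', 31), ('Feb', 28), ('Mar', 31),
--               ('Apr', 30), ('May', 31), ('Jun', 30),
--               ('Jul', 31), ('Aug', 31), ('Sep', 30),
--               ('Oct', 31), ('Nov', 30), ('Dec', 31)]
--
-- def fill_months_to(year, month, months_):
--     current_month, current_year, current_weekday = months_[-1]
--     current_month_days = next(i for i, v in enumerate(month_days) if current_month == v[0])
--     while current_year < year or current_month != month:
--         century = current_year % 100 == 0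
--         four_century = current_year % 400 == 0
--         leap_year = True if four_century else False if century else current_year % 4 == 0
--         days_in_month = 29 if current_month == 'Feb' and leap_year else month_days[current_month_days][1]
--         current_weekday = (current_weekday + days_in_month) % 7
--         current_month_days = (current_month_days + 1) % 12
--         current_year = current_year if current_month != 'Dec' else current_year + 1
--         current_month = month_days[current_month_days][0]
--         months_.append((current_month, current_year, current_weekday))
--     return months_
-- ===== SOURCE B (Python) =====
-- month_days = [('Jan', 31), ('Feb', 28), ('Mar', 31),
--               ('Apr', 30), ('May', 31), ('Jun', 30),
--               ('Jul', 31), ('Aug', 31), ('Sep', 30),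
--               ('Oct', 31), ('Nov', 30), ('Dec', 31)]
--
-- _names = [n for n, _ in month_days]
-- _cum = [0]
-- for _, _d in month_days:
--     _cum.append(_cum[-1] + _d)
--
--
-- def _S(M):
--     # Total days in all absolute months < M (month M = year M//12, index M%12),
--     # counting one extra day for each leap-year February, via floor-division
--     # leap counting -- no iteration.
--     q, r = divmod(M, 12)
--     n = q + (1 if r >= 2 else 0)
--     m = n - 1
--     return 365 * q + _cum[r] + m // 4 - m // 100 + m // 400
--
--
-- def fill_months_to(year, month, months_):
--     # Mutates months_ in place (extend), exactly like the original.
--     name, y0, w0 = months_[-1]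
--     si = _names.index(name)
--     ti = _names.index(month)
--     a = 12 * y0 + si
--     b = 12 * year + ti
--     steps = b - a if a < b else (ti - si) % 12
--     base = w0 - _S(a)
--     months_.extend((_names[M % 12], M // 12, (base + _S(M)) % 7)
--                    for M in range(a + 1, a + steps + 1))
--     return months_
-- ===== Notes on version B (the rewrite author's own statement) =====
-- stated objective: alternative
-- what changed: B computes each appended entry's weekday directly from a closed-form cumulative-day-count function (365*q + month-prefix table + floor-division leap-year counting), mapping it over the range of absolute month numbers, instead of A's sequential weekday accumulation month by month.
-- outside the precondition, e.g. on fill_months_to(2000, 'Jan', []): A raises IndexError, B raises IndexError; on fill_months_to(2000, 'Jan', [('Foo', 1999, 0)]): A raises StopIteration, B raises ValueError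
import Mathlib
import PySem

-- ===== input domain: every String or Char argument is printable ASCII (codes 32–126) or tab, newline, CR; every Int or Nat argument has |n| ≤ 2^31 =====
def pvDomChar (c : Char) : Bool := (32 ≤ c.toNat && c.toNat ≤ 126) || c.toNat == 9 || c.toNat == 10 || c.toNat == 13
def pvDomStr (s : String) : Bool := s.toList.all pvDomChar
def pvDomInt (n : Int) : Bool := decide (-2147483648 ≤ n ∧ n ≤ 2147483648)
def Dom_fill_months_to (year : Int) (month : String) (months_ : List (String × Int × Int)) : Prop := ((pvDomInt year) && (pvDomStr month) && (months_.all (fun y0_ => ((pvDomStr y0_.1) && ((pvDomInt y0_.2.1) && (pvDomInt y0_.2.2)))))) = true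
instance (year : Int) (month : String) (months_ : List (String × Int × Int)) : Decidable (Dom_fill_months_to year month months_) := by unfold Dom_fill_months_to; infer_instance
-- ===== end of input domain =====

-- B replaces A's sequential weekday accumulation by a closed-form day-count function: each
-- appended entry's weekday is computed directly from a cumulative-days formula with
-- floor-division leap-year counting, mapped over the range of absolute month numbers
-- ("alternative"). Both Pythons mutate months_ in place by appending the same tuples; the
-- theorems are about the returned list.

-- ===== PORT A =====
def monthDays : List (String × Int) :=
  [("Jan", 31), ("Feb", 28), ("Mar", 31), ("Apr", 30), ("May", 31), ("Jun", 30),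
   ("Jul", 31), ("Aug", 31), ("Sep", 30), ("Oct", 31), ("Nov", 30), ("Dec", 31)]

-- month_days[i][0] and month_days[i][1]; the ports only use them with 0 ≤ i < 12, where they are exact
def mdName (i : Int) : String := (((PySem.List.pyGet? monthDays i).map Prod.fst).getD "")
def mdDays (i : Int) : Int := (((PySem.List.pyGet? monthDays i).map Prod.snd).getD 0)

-- next(i for i, v in enumerate(month_days) if name == v[0]); none = StopIteration
def monthIdxA (name : String) : Option Int :=
  ((PySem.List.enumerate monthDays).find? (fun p => name == p.2.1)).map Prod.fst

-- the while loop of A; fuel only makes the recursion total (Pre_ guarantees it is enough)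
def loopA (fuel : Nat) (year : Int) (month : String) (cm : String) (cy cw ci : Int)
    (acc : List (String × Int × Int)) : List (String × Int × Int) :=
  match fuel with
  | 0 => acc
  | fuel + 1 =>
    if cy < year ∨ cm ≠ month then
      let century : Bool := PySem.Int.mod cy 100 == 0
      let fourCentury : Bool := PySem.Int.mod cy 400 == 0
      let leapYear : Bool := if fourCentury then true else if century then false else PySem.Int.mod cy 4 == 0
      let daysInMonth : Int := if cm == "Feb" && leapYear then 29 else mdDays ci
      let cw' := PySem.Int.mod (cw + daysInMonth) 7
      let ci' := PySem.Int.mod (ci + 1) 12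
      let cy' := if cm ≠ "Dec" then cy else cy + 1
      let cm' := mdName ci'
      loopA fuel year month cm' cy' cw' ci' (acc ++ [(cm', cy', cw')])
    else acc

def fill_months_to (year : Int) (month : String) (months_ : List (String × Int × Int)) :
    List (String × Int × Int) :=
  match PySem.List.pyGet? months_ (-1) with
  | none => []                                  -- IndexError (months_ empty), outside Pre_
  | some (cm, cy, cw) =>
    match monthIdxA cm with
    | none => []                                -- StopIteration, outside Pre_
    | some ci => loopA (((year - cy).toNat + 2) * 12) year month cm cy cw ci months_

-- ===== PORT B =====
def monthNames : List String :=
  ["Jan", "Feb", "Mar", "Apr", "May", "Jun", "Jul", "Aug", "Sep", "Oct", "Nov", "Dec"]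

-- _cum: cumulative (non-leap) day counts, _cum[r] = days in months 0..r-1
def cumT : List Int := [0, 31, 59, 90, 120, 151, 181, 212, 243, 273, 304, 334, 365]

-- _S(M): days in all absolute months < M, leap Februaries counted in closed form
def Sfun (M : Int) : Int :=
  let q := PySem.Int.floordiv M 12
  let r := PySem.Int.mod M 12
  let n := q + (if 2 ≤ r then 1 else 0)
  let m := n - 1
  365 * q + PySem.List.pyGetD cumT r 0
    + PySem.Int.floordiv m 4 - PySem.Int.floordiv m 100 + PySem.Int.floordiv m 400

-- the tuple produced by Source B's generator expression for absolute month M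
def entryB (base : Int) (M : Int) : String × Int × Int :=
  (PySem.List.pyGetD monthNames (PySem.Int.mod M 12) "",
   PySem.Int.floordiv M 12,
   PySem.Int.mod (base + Sfun M) 7)

def fill_months_to_alt (year : Int) (month : String) (months_ : List (String × Int × Int)) :
    List (String × Int × Int) :=
  match PySem.List.pyGet? months_ (-1) with
  | none => []                                  -- IndexError, outside Pre_
  | some (name, y0, w0) =>
    match PySem.List.index? monthNames name, PySem.List.index? monthNames month with
    | some si, some ti =>
      let a : Int := 12 * y0 + (si : Int)
      let b : Int := 12 * year + (ti : Int)
      let steps : Int := if a < b then b - a else PySem.Int.mod ((ti : Int) - (si : Int)) 12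
      let base : Int := w0 - Sfun a
      months_ ++ (PySem.List.pyRange (a + 1) (a + steps + 1) 1).map (entryB base)
    | _, _ => []                                -- ValueError, outside Pre_

-- ===== PRECONDITION & SPEC =====
-- Pre_ excludes exactly: empty months_ (A raises IndexError), a seed whose month name is not one
-- of the twelve (A raises StopIteration), and a target month name that is not one of the twelve
-- (A loops forever).
def Pre_fill_months_to (_year : Int) (month : String) (months_ : List (String × Int × Int)) : Prop :=
  months_ ≠ [] ∧ (∀ t ∈ months_.getLast?, t.1 ∈ monthNames) ∧ month ∈ monthNames
instance (year : Int) (month : String) (months_ : List (String × Int × Int)) : Decidable (Pre_fill_months_to year month months_) := by unfold Pre_fill_months_to; infer_instance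

def pvWitness_fill_months_to : Int × String × (List (String × Int × Int)) :=
  (1900, "Mar", [("Jan", 1900, 1)])

def Spec_fill_months_to (year : Int) (month : String) (months_ : List (String × Int × Int)) (out : List (String × Int × Int)) : Prop := out = fill_months_to_alt year month months_
instance (year : Int) (month : String) (months_ : List (String × Int × Int)) (out : List (String × Int × Int)) : Decidable (Spec_fill_months_to year month months_ out) := by unfold Spec_fill_months_to; infer_instance

-- ===== CLAIM (what is proved, stated in full; the proofs are below) =====
def Claim_equal_fill_months_to : Prop := ∀ (year : Int) (month : String) (months_ : List (String × Int × Int)), Dom_fill_months_to year month months_ → Pre_fill_months_to year month months_ → Spec_fill_months_to year month months_ (fill_months_to year month months_)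

-- ===== LEMMAS AND PROOFS =====

-- exact number of iterations of A's while loop from state (cy, month-index si), target (year, ti)
def stepsOf (year ti cy si : Int) : Int :=
  if 12 * cy + si < 12 * year + ti then 12 * year + ti - (12 * cy + si) else (ti - si) % 12

lemma mdName_inj_fin : ∀ i j : Fin 12, mdName (i : Int) = mdName (j : Int) → i = j := by decide

lemma mdName_inj {i j : Int} (h0 : 0 ≤ i) (h1 : i < 12) (h2 : 0 ≤ j) (h3 : j < 12)
    (h : mdName i = mdName j) : i = j := by
  have hi : i = ((⟨i.toNat, by omega⟩ : Fin 12) : Int) := by simp; omega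
  have hj : j = ((⟨j.toNat, by omega⟩ : Fin 12) : Int) := by simp; omega
  rw [hi, hj] at h ⊢
  exact congrArg (fun x : Fin 12 => (x : Int)) (mdName_inj_fin _ _ h)

lemma steps_nonneg (year ti cy si : Int) : 0 ≤ stepsOf year ti cy si := by
  unfold stepsOf; split <;> omega

lemma steps_zero {year ti cy si : Int} (h0 : 0 ≤ ti) (h1 : ti < 12) (h2 : 0 ≤ si) (h3 : si < 12)
    (h : stepsOf year ti cy si = 0) : ¬ cy < year ∧ si = ti := by
  unfold stepsOf at h; split at h <;> omega

lemma steps_succ {year ti cy si : Int} (h0 : 0 ≤ ti) (h1 : ti < 12) (h2 : 0 ≤ si) (h3 : si < 12)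
    (hcond : cy < year ∨ si ≠ ti) :
    stepsOf year ti cy si = stepsOf year ti (if si = 11 then cy + 1 else cy) ((si + 1) % 12) + 1 := by
  unfold stepsOf; split_ifs <;> omega

lemma steps_zero_of {year ti cy si : Int} (hge : ¬ cy < year) (heq : si = ti) :
    stepsOf year ti cy si = 0 := by
  unfold stepsOf; split <;> omega

lemma name_feb {si : Int} (h2 : 0 ≤ si) (h3 : si < 12) :
    (mdName si == "Feb") = (si == (1 : Int)) := by
  by_cases h : si = 1
  · subst h; decide
  · have : mdName si ≠ "Feb" := by
      intro hc
      exact h (mdName_inj h2 h3 (by norm_num) (by norm_num) (by rw [hc]; decide))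
    simp [this, h]

lemma name_dec {si : Int} (h2 : 0 ≤ si) (h3 : si < 12) :
    (mdName si ≠ "Dec") ↔ ¬ si = 11 := by
  constructor
  · intro hne h; apply hne; subst h; decide
  · intro hne hc
    exact hne (mdName_inj h2 h3 (by norm_num) (by norm_num) (by rw [hc]; decide))

-- value of the cumulative table / month-length table as an if-chain (omega-friendly)
def cumVal (r : Int) : Int :=
  if r ≤ 0 then 0 else if r ≤ 1 then 31 else if r ≤ 2 then 59 else if r ≤ 3 then 90
  else if r ≤ 4 then 120 else if r ≤ 5 then 151 else if r ≤ 6 then 181 else if r ≤ 7 then 212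
  else if r ≤ 8 then 243 else if r ≤ 9 then 273 else if r ≤ 10 then 304 else if r ≤ 11 then 334
  else 365

def dVal (r : Int) : Int :=
  if r ≤ 0 then 31 else if r ≤ 1 then 28 else if r ≤ 2 then 31 else if r ≤ 3 then 30
  else if r ≤ 4 then 31 else if r ≤ 5 then 30 else if r ≤ 6 then 31 else if r ≤ 7 then 31
  else if r ≤ 8 then 30 else if r ≤ 9 then 31 else if r ≤ 10 then 30 else 31

lemma cum_get {r : Int} (h0 : 0 ≤ r) (h1 : r ≤ 12) :
    PySem.List.pyGetD cumT r 0 = cumVal r := by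
  interval_cases r <;> decide

lemma mdDays_val {r : Int} (h0 : 0 ≤ r) (h1 : r < 12) : mdDays r = dVal r := by
  interval_cases r <;> decide

-- Sfun with Python's // and % rewritten to Lean's ediv/emod (all divisors positive)
lemma Sfun_eq (M : Int) :
    Sfun M = 365 * (M / 12) + PySem.List.pyGetD cumT (M % 12) 0
      + (M / 12 + (if 2 ≤ M % 12 then 1 else 0) - 1) / 4
      - (M / 12 + (if 2 ≤ M % 12 then 1 else 0) - 1) / 100
      + (M / 12 + (if 2 ≤ M % 12 then 1 else 0) - 1) / 400 := by
  simp only [Sfun,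
      PySem.Int.floordiv_eq_ediv_of_pos (show (0:Int) < 12 by norm_num),
      PySem.Int.mod_eq_emod_of_pos (show (0:Int) < 12 by norm_num),
      PySem.Int.floordiv_eq_ediv_of_pos (show (0:Int) < 4 by norm_num),
      PySem.Int.floordiv_eq_ediv_of_pos (show (0:Int) < 100 by norm_num),
      PySem.Int.floordiv_eq_ediv_of_pos (show (0:Int) < 400 by norm_num)]

-- Sfun with the table lookup replaced by its if-chain value
lemma Sfun_eq' (M : Int) :
    Sfun M = 365 * (M / 12) + cumVal (M % 12)
      + (M / 12 + (if 2 ≤ M % 12 then 1 else 0) - 1) / 4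
      - (M / 12 + (if 2 ≤ M % 12 then 1 else 0) - 1) / 100
      + (M / 12 + (if 2 ≤ M % 12 then 1 else 0) - 1) / 400 := by
  rw [Sfun_eq, cum_get (by omega) (by omega)]

-- the closed-form day count advances by exactly the number of days A adds for month 12q+r
lemma S_step (q r : Int) (h0 : 0 ≤ r) (h1 : r < 12) :
    Sfun (12 * q + r + 1) = Sfun (12 * q + r) +
      (if (r == (1 : Int)) &&
          (PySem.Int.mod q 400 == 0 || (!(PySem.Int.mod q 100 == 0) && PySem.Int.mod q 4 == 0))
       then 29 else mdDays r) := by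
  rw [Sfun_eq', Sfun_eq', mdDays_val h0 h1,
      PySem.Int.mod_eq_emod_of_pos (show (0:Int) < 400 by norm_num),
      PySem.Int.mod_eq_emod_of_pos (show (0:Int) < 100 by norm_num),
      PySem.Int.mod_eq_emod_of_pos (show (0:Int) < 4 by norm_num)]
  by_cases hr : r = 11
  · subst hr
    have e1 : (12 * q + 11 + 1 : Int) / 12 = q + 1 := by omega
    have e2 : (12 * q + 11 + 1 : Int) % 12 = 0 := by omega
    have e3 : (12 * q + 11 : Int) / 12 = q := by omega
    have e4 : (12 * q + 11 : Int) % 12 = 11 := by omega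
    rw [e1, e2, e3, e4]
    norm_num [cumVal, dVal]
    omega
  · have e1 : (12 * q + r + 1 : Int) / 12 = q := by omega
    have e2 : (12 * q + r + 1 : Int) % 12 = r + 1 := by omega
    have e3 : (12 * q + r : Int) / 12 = q := by omega
    have e4 : (12 * q + r : Int) % 12 = r := by omega
    rw [e1, e2, e3, e4]
    have h1' : r < 11 := by omega
    interval_cases r <;>
      (norm_num [cumVal, dVal]
       omega)

lemma mdName_eq_pyGetD_fin :
    ∀ i : Fin 12, mdName (i : Int) = PySem.List.pyGetD monthNames (i : Int) "" := by decide

lemma mdName_eq_pyGetD {i : Int} (h0 : 0 ≤ i) (h1 : i < 12) :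
    mdName i = PySem.List.pyGetD monthNames i "" := by
  have hi : i = ((⟨i.toNat, by omega⟩ : Fin 12) : Int) := by simp; omega
  rw [hi]; exact mdName_eq_pyGetD_fin _

-- A's while loop, from a state describing absolute month M, produces exactly Source B's
-- comprehension over the absolute months M+1 .. M+s
lemma loop_eq (s : Nat) : ∀ (fuel : Nat) (year ti cy cw ci M base : Int)
    (acc : List (String × Int × Int)),
    0 ≤ ti → ti < 12 → 0 ≤ ci → ci < 12 → M = 12 * cy + ci →
    cw % 7 = (base + Sfun M) % 7 →
    (s : Int) = stepsOf year ti cy ci → s ≤ fuel →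
    loopA fuel year (mdName ti) (mdName ci) cy cw ci acc
      = acc ++ (PySem.List.pyRange (M + 1) (M + 1 + s) 1).map (entryB base) := by
  induction s with
  | zero =>
    intro fuel year ti cy cw ci M base acc h0 h1 h2 h3 hM hcw hn hfuel
    obtain ⟨hge, heq⟩ := steps_zero h0 h1 h2 h3 (by exact_mod_cast hn.symm)
    have hnames : mdName ci = mdName ti := by rw [heq]
    rw [show (M + 1 + (0:Nat) : Int) = M + 1 by push_cast; ring,
        PySem.List.pyRange_one_eq_nil (by omega)]
    simp only [List.map_nil, List.append_nil]
    cases fuel with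
    | zero => rfl
    | succ f =>
      simp only [loopA]
      rw [if_neg (not_or.mpr ⟨by omega, not_not.mpr hnames⟩)]
  | succ s ih =>
    intro fuel year ti cy cw ci M base acc h0 h1 h2 h3 hM hcw hn hfuel
    cases fuel with
    | zero => omega
    | succ f =>
      have hcond : cy < year ∨ mdName ci ≠ mdName ti := by
        by_contra hc
        rw [not_or, not_not] at hc
        obtain ⟨hge, hnm⟩ := hc
        rw [not_lt] at hge
        have heq : ci = ti := mdName_inj h2 h3 h0 h1 hnm
        have hz := steps_zero_of (year := year) (ti := ti) (cy := cy) (si := ci) (by omega) heq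
        omega
      have hmod12 : PySem.Int.mod (ci + 1) 12 = (ci + 1) % 12 :=
        PySem.Int.mod_eq_emod_of_pos (by norm_num)
      have hci' : (ci + 1) % 12 = (M + 1) % 12 := by omega
      have hM12 : (M + 1) / 12 = (if ci = 11 then cy + 1 else cy) := by split <;> omega
      -- the days A adds, in the form S_step produces
      have hdays :
          (if (mdName ci == "Feb") &&
               (if (PySem.Int.mod cy 400 == 0) then true
                else if (PySem.Int.mod cy 100 == 0) then false
                else PySem.Int.mod cy 4 == 0) then (29 : Int) else mdDays ci)
            = (if (ci == (1 : Int)) &&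
                 (PySem.Int.mod cy 400 == 0 ||
                   (!(PySem.Int.mod cy 100 == 0) && PySem.Int.mod cy 4 == 0)) then (29 : Int)
               else mdDays ci) := by
        rw [name_feb h2 h3]
        cases hb4 : (PySem.Int.mod cy 400 == 0) <;> cases hb1 : (PySem.Int.mod cy 100 == 0) <;> simp
      have hS := S_step cy ci h2 h3
      rw [← hM] at hS
      have hmod7 : ∀ x : Int, PySem.Int.mod x 7 = x % 7 := fun x =>
        PySem.Int.mod_eq_emod_of_pos (by norm_num)
      -- the appended tuple equals entryB base (M+1)
      have hentry :
          ((mdName (PySem.Int.mod (ci + 1) 12),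
            (if mdName ci ≠ "Dec" then cy else cy + 1),
            PySem.Int.mod (cw + (if (mdName ci == "Feb") &&
               (if (PySem.Int.mod cy 400 == 0) then true
                else if (PySem.Int.mod cy 100 == 0) then false
                else PySem.Int.mod cy 4 == 0) then (29 : Int) else mdDays ci)) 7)
            : String × Int × Int) = entryB base (M + 1) := by
        unfold entryB
        refine Prod.ext ?_ (Prod.ext ?_ ?_)
        · show mdName (PySem.Int.mod (ci + 1) 12) = PySem.List.pyGetD monthNames (PySem.Int.mod (M+1) 12) ""
          rw [hmod12, hci', PySem.Int.mod_eq_emod_of_pos (show (0:Int) < 12 by norm_num)]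
          exact mdName_eq_pyGetD (by omega) (by omega)
        · show (if mdName ci ≠ "Dec" then cy else cy + 1) = PySem.Int.floordiv (M+1) 12
          rw [PySem.Int.floordiv_eq_ediv_of_pos (show (0:Int) < 12 by norm_num), hM12]
          by_cases h : ci = 11
          · rw [if_neg (by rw [h]; exact not_not.mpr (by decide)), if_pos h]
          · rw [if_pos ((name_dec h2 h3).mpr h), if_neg h]
        · show PySem.Int.mod (cw + _) 7 = PySem.Int.mod (base + Sfun (M+1)) 7
          rw [hdays, hmod7, hmod7, hS]
          omega
      simp only [loopA]
      rw [if_pos hcond, hentry]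
      have hrange : PySem.List.pyRange (M + 1) (M + 1 + (s + 1 : Nat)) 1
          = (M + 1) :: PySem.List.pyRange (M + 1 + 1) (M + 1 + (s + 1 : Nat)) 1 :=
        PySem.List.pyRange_one_cons (by push_cast; omega)
      rw [hrange, List.map_cons, show acc ++ (entryB base (M+1) :: (PySem.List.pyRange (M + 1 + 1) (M + 1 + (s + 1 : Nat)) 1).map (entryB base)) = (acc ++ [entryB base (M+1)]) ++ (PySem.List.pyRange (M + 1 + 1) (M + 1 + (s + 1 : Nat)) 1).map (entryB base) by simp]
      have hstep := steps_succ h0 h1 h2 h3 (by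
        rcases hcond with h | h
        · exact Or.inl h
        · exact Or.inr (fun he => h (by rw [he])))
      have hci'' : PySem.Int.mod (ci + 1) 12 = (ci + 1) % 12 := hmod12
      have := ih f year ti (if ci = 11 then cy + 1 else cy)
        (PySem.Int.mod (cw + (if (mdName ci == "Feb") &&
               (if (PySem.Int.mod cy 400 == 0) then true
                else if (PySem.Int.mod cy 100 == 0) then false
                else PySem.Int.mod cy 4 == 0) then (29 : Int) else mdDays ci)) 7)
        (PySem.Int.mod (ci + 1) 12) (M + 1) base (acc ++ [entryB base (M+1)])
        h0 h1 (by rw [hci'']; omega) (by rw [hci'']; omega)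
        (by rw [hci'', hci']; split <;> omega)
        (by
          rw [hdays, hmod7, hS]; omega)
        (by rw [hci'']; omega)
        (by omega)
      -- align the year/cm' arguments of the recursive call with the lemma's shape
      have hcy' : (if mdName ci ≠ "Dec" then cy else cy + 1) = (if ci = 11 then cy + 1 else cy) := by
        by_cases h : ci = 11
        · rw [if_neg (by rw [h]; exact not_not.mpr (by decide)), if_pos h]
        · rw [if_pos ((name_dec h2 h3).mpr h), if_neg h]
      rw [hcy', show (M + 1 + ((s + 1 : Nat) : Int)) = M + 1 + 1 + ((s : Nat) : Int) by push_cast; ring]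
      exact this

-- find? over enumerate picks the first matching index = index? on the names
lemma findIdx_enum (s : String) : ∀ (l : List (String × Int)) (st : Int),
    ((PySem.List.enumerate l st).find? (fun p => s == p.2.1)).map Prod.fst
      = (PySem.List.index? (l.map Prod.fst) s).map (fun k => (k : Int) + st) := by
  intro l
  induction l with
  | nil => intro st; simp [PySem.List.enumerate_nil, PySem.List.index?]
  | cons a l ih =>
    intro st
    rw [PySem.List.enumerate_cons, List.map_cons]
    by_cases h : s = a.1
    · rw [List.find?_cons_of_pos (by simp [h]), h, PySem.List.index?_cons_self]
      simp
    · have hne : a.1 ≠ s := fun he => h he.symm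
      rw [List.find?_cons_of_neg (by simp [h]), PySem.List.index?_cons_of_ne (l.map Prod.fst) hne, ih (st + 1)]
      cases hidx : PySem.List.index? (l.map Prod.fst) s <;> simp
      omega

lemma monthIdxA_eq (s : String) :
    monthIdxA s = (PySem.List.index? monthNames s).map (fun k => (k : Int)) := by
  have h := findIdx_enum s monthDays 0
  have hnames : monthDays.map Prod.fst = monthNames := by decide
  unfold monthIdxA
  rw [hnames] at h
  rw [h]
  cases PySem.List.index? monthNames s <;> simp

lemma mdName_eq_names : ∀ i : Fin 12, mdName (i : Int) = monthNames.getD i.val "" := by decide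

lemma index?_props {s : String} {k : Nat} (h : PySem.List.index? monthNames s = some k) :
    k < 12 ∧ s = mdName (k : Int) := by
  obtain ⟨hk, hs, -⟩ := PySem.List.getElem_of_index?_eq_some h
  have hk12 : k < 12 := by simpa [monthNames] using hk
  refine ⟨hk12, ?_⟩
  rw [← hs, mdName_eq_names ⟨k, hk12⟩]
  simp [List.getD_eq_getElem?_getD, List.getElem?_eq_getElem hk]

-- ===== VERDICT (by name: the statement is the Claim_ definition above) =====
theorem fill_months_to_spec : Claim_equal_fill_months_to := by
  intro year month months_ _hdom hpre
  obtain ⟨hne, hlast, hmonth⟩ := hpre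
  unfold Spec_fill_months_to fill_months_to fill_months_to_alt
  rw [PySem.List.pyGet?_neg_one]
  obtain ⟨t, ht⟩ : ∃ t, months_.getLast? = some t := by
    cases h : months_.getLast? with
    | none => exact absurd (List.getLast?_eq_none_iff.mp h) hne
    | some t => exact ⟨t, rfl⟩
  obtain ⟨cm, cy, cw⟩ := t
  have hcm : cm ∈ monthNames := hlast _ (by rw [ht]; rfl)
  rw [← PySem.List.index?_isSome_iff] at hcm hmonth
  obtain ⟨si, hsi⟩ := Option.isSome_iff_exists.mp hcm
  obtain ⟨ti, hti⟩ := Option.isSome_iff_exists.mp hmonth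
  obtain ⟨hsi12, hcmeq⟩ := index?_props hsi
  obtain ⟨hti12, hmeq⟩ := index?_props hti
  rw [ht]
  simp only [monthIdxA_eq, hsi, hti, Option.bind_eq_bind, Option.bind_some, Option.pure_def, Option.map_some]
  subst hcmeq hmeq
  have hmod : PySem.Int.mod ((ti : Int) - (si : Int)) 12 = ((ti : Int) - (si : Int)) % 12 :=
    PySem.Int.mod_eq_emod_of_pos (by norm_num)
  have hsteps :
      (if 12 * cy + (si : Int) < 12 * year + (ti : Int)
         then 12 * year + (ti : Int) - (12 * cy + (si : Int))
         else PySem.Int.mod ((ti : Int) - (si : Int)) 12) = stepsOf year ti cy si := by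
    rw [hmod]; rfl
  rw [hsteps]
  have hnn := steps_nonneg year ti cy si
  have hcast : ((stepsOf year ti cy si).toNat : Int) = stepsOf year ti cy si := by omega
  have hbound : stepsOf year ti cy si ≤ ((year - cy).toNat + 2) * 12 := by
    unfold stepsOf; split <;> omega
  have h := loop_eq (stepsOf year ti cy si).toNat (((year - cy).toNat + 2) * 12)
    year ti cy cw si (12 * cy + (si : Int)) (cw - Sfun (12 * cy + (si : Int))) months_
    (by omega) (by exact_mod_cast hti12) (by omega) (by exact_mod_cast hsi12)
    rfl (by ring_nf) hcast (by omega)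
  rw [hcast] at h
  rw [show (12 * cy + ((si:Nat) : Int) + stepsOf year ((ti:Nat) : Int) cy ((si:Nat) : Int) + 1)
        = 12 * cy + ((si:Nat) : Int) + 1 + stepsOf year ((ti:Nat) : Int) cy ((si:Nat) : Int) by ring]
  exact h
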